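-- pv_equiv track=rewrite | github.com/go-arlo/go-arlo-swarm | src/go_arlo_agency/arlo/tools/summary.py | _generate_social_paragraph
-- ===== SOURCE A (Python) =====
-- def _generate_social_paragraph(strengths, concerns, sentiment_points):
--     """Generate a paragraph focused on social sentiment insights"""
--     social_insights = []
--
--     high_follower_post = next((point for point in sentiment_points if "high-follower" in point.lower() and "@" in point), None)
--     if high_follower_post:
--         social_insights.append(f"Notable recent high-follower posts detected from {high_follower_post.split('(e.g. ')[1].split(')')[0] if '(e.g. ' in high_follower_post else 'significant engagement'}.")
--
--     elif next((point for point in sentiment_points if "high-follower" in point.lower()), None) is None: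
--         mid_follower_post = next((point for point in sentiment_points if "mid-follower" in point.lower() and "@" in point), None)
--         if mid_follower_post:
--             social_insights.append(f"Recent active engagement through mid-follower posts with {mid_follower_post.split('(e.g. ')[1].split(')')[0] if '(e.g. ' in mid_follower_post else 'moderate engagement'}.")
--
--     warning_tweet = next((point for point in sentiment_points if "warning:" in point.lower()), None)
--     if warning_tweet:
--         warning_detail = warning_tweet.split("WARNING: ")[1] if "WARNING: " in warning_tweet else warning_tweet
--         social_insights.append(f"Warning signals detected including {warning_detail}.")
--
--     warning_flags = any("warning" in s.lower() or "scam" in s.lower() or "fake" in s.lower() for s in sentiment_points)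
--     if warning_flags and not warning_tweet:
--         social_insights.append("Warning signals detected in social channels suggest potential for manipulation or misleading information.")
--
--     community_engagement_point = next((point for point in sentiment_points if "community engagement" in point.lower()), None)
--     if community_engagement_point:
--         if "strong" in community_engagement_point.lower():
--             community_statement = "Community engagement is strong."
--             social_insights.append(community_statement)
--         elif "moderate" in community_engagement_point.lower():
--             community_statement = "Community engagement is moderate."
--             social_insights.append(community_statement)
--         elif "limited" in community_engagement_point.lower() or "weak" in community_engagement_point.lower() or "low" in community_engagement_point.lower():
--             community_statement = "Community engagement is limited."
--             social_insights.append(community_statement)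
--         else:
--             split_result = community_engagement_point.split('community', 1)
--             if len(split_result) > 1 and split_result[1].strip():
--                 community_statement = f"Community {split_result[1].strip()}."
--                 social_insights.append(community_statement)
--
--     social_presence_point = next((point for point in sentiment_points if "overall social presence" in point.lower()), None)
--     if social_presence_point:
--         split_result = social_presence_point.split('overall', 1)
--         if len(split_result) > 1 and split_result[1].strip():
--             presence_statement = f"Overall {split_result[1].strip()}."
--             social_insights.append(presence_statement)
--
--     limited_engagement = any("limited engagement" in s.lower() or "low engagement" in s.lower() for s in sentiment_points)
--     if limited_engagement:
--         social_insights.append("Limited social engagement indicates either low market awareness or cooling interest, presenting both risk and potential opportunity if traction increases.")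
--
--     negative_sentiment = any("negative sentiment" in p.lower() or "weak sentiment" in p.lower() for p in sentiment_points)
--     if negative_sentiment:
--         social_insights.append("Negative sentiment trends could suppress price appreciation in the near term.")
--
--     community_strength = any("community" in s.lower() and "strong" in s.lower() for s in strengths)
--     if community_strength:
--         social_insights.append("Strong community foundation provides potential for sustained interest and organic growth.")
--
--     if not social_insights:
--         return "Social metrics show neutral sentiment with no significant positive or negative signals detected."
--
--     return " ".join(social_insights)
-- ===== SOURCE B (Python) =====
-- def _follow_part(hi_at, hi_any, mid_at):
--     if hi_at is not None:
--         tag = hi_at.split("(e.g. ")[1].split(")")[0] if "(e.g. " in hi_at else "significant engagement"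
--         return ["Notable recent high-follower posts detected from %s." % tag]
--     if hi_any is None and mid_at is not None:
--         tag = mid_at.split("(e.g. ")[1].split(")")[0] if "(e.g. " in mid_at else "moderate engagement"
--         return ["Recent active engagement through mid-follower posts with %s." % tag]
--     return []
--
--
-- def _warning_part(warning, warn_flag):
--     if warning is not None:
--         detail = warning.split("WARNING: ")[1] if "WARNING: " in warning else warning
--         return ["Warning signals detected including %s." % detail]
--     if warn_flag:
--         return ["Warning signals detected in social channels suggest potential for manipulation or misleading information."]
--     return []
--
--
-- def _community_part(community):
--     if community is None:
--         return []
--     low = community.lower()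
--     if "strong" in low:
--         return ["Community engagement is strong."]
--     if "moderate" in low:
--         return ["Community engagement is moderate."]
--     if "limited" in low or "weak" in low or "low" in low:
--         return ["Community engagement is limited."]
--     rest = community.split("community", 1)
--     if len(rest) > 1 and rest[1].strip():
--         return ["Community %s." % rest[1].strip()]
--     return []
--
--
-- def _presence_part(presence):
--     if presence is None:
--         return []
--     rest = presence.split("overall", 1)
--     if len(rest) > 1 and rest[1].strip():
--         return ["Overall %s." % rest[1].strip()]
--     return []
--
--
-- def _generate_social_paragraph(strengths, concerns, sentiment_points):
--     # one pass over sentiment_points: capture the first point matching each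
--     # predicate, and the three any-flags; lower() is computed once per point
--     hi_at = hi_any = mid_at = warning = community = presence = None
--     warn_flag = limited = negative = False
--     for p in sentiment_points:
--         low = p.lower()
--         if hi_at is None and "high-follower" in low and "@" in p:
--             hi_at = p
--         if hi_any is None and "high-follower" in low:
--             hi_any = p
--         if mid_at is None and "mid-follower" in low and "@" in p:
--             mid_at = p
--         if warning is None and "warning:" in low:
--             warning = p
--         if community is None and "community engagement" in low:
--             community = p
--         if presence is None and "overall social presence" in low:
--             presence = p
--         warn_flag = warn_flag or "warning" in low or "scam" in low or "fake" in low
--         limited = limited or "limited engagement" in low or "low engagement" in low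
--         negative = negative or "negative sentiment" in low or "weak sentiment" in low
--
--     strong_comm = False
--     for s in strengths:
--         low = s.lower()
--         strong_comm = strong_comm or ("community" in low and "strong" in low)
--
--     out = (
--         _follow_part(hi_at, hi_any, mid_at)
--         + _warning_part(warning, warn_flag)
--         + _community_part(community)
--         + _presence_part(presence)
--     )
--     if limited:
--         out.append("Limited social engagement indicates either low market awareness or cooling interest, presenting both risk and potential opportunity if traction increases.")
--     if negative:
--         out.append("Negative sentiment trends could suppress price appreciation in the near term.")
--     if strong_comm:
--         out.append("Strong community foundation provides potential for sustained interest and organic growth.")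
--
--     if not out:
--         return "Social metrics show neutral sentiment with no significant positive or negative signals detected."
--     return " ".join(out)
-- ===== Notes on version B (the rewrite author's own statement) =====
-- stated objective: alternative
-- what changed: A's nine independent scans of sentiment_points (six next(generator) first-match searches and three any(...) passes, each recomputing .lower() per element) are replaced by a single loop that computes lower() once per point and captures the first match for each predicate plus the three boolean flags, with the sentence assembly factored into small helper functions. (constant-factor: one pass instead of nine and one lower() per point)
import Mathlib
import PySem

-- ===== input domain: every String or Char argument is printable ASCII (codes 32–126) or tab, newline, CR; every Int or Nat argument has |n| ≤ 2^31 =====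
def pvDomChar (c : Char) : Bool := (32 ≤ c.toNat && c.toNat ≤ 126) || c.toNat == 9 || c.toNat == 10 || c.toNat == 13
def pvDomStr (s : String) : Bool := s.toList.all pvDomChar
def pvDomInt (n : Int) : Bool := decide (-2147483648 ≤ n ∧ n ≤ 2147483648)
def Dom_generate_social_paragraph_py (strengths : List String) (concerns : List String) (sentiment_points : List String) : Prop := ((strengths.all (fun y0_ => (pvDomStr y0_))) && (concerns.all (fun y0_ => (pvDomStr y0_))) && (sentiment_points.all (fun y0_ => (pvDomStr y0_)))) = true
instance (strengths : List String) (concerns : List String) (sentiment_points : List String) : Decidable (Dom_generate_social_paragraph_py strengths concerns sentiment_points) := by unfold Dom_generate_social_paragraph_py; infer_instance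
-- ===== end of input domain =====

-- B rewrites A's nine independent scans of sentiment_points as ONE loop capturing the
-- first match of each predicate plus the three any-flags (lower() computed once per
-- point), then assembles the same sentences; return value only, no mutation involved.

-- Shared predicate / formatting helpers (both Python versions contain these
-- conditions and sentence texts verbatim).
def pvIsHiAt (p : String) : Bool :=
  PySem.Str.isIn "high-follower" (PySem.Str.lower p) && PySem.Str.isIn "@" p
def pvIsHi (p : String) : Bool := PySem.Str.isIn "high-follower" (PySem.Str.lower p)
def pvIsMidAt (p : String) : Bool :=
  PySem.Str.isIn "mid-follower" (PySem.Str.lower p) && PySem.Str.isIn "@" p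
def pvIsWarn (p : String) : Bool := PySem.Str.isIn "warning:" (PySem.Str.lower p)
def pvIsComm (p : String) : Bool := PySem.Str.isIn "community engagement" (PySem.Str.lower p)
def pvIsPres (p : String) : Bool := PySem.Str.isIn "overall social presence" (PySem.Str.lower p)
def pvFlagWarn (s : String) : Bool :=
  PySem.Str.isIn "warning" (PySem.Str.lower s) || PySem.Str.isIn "scam" (PySem.Str.lower s)
    || PySem.Str.isIn "fake" (PySem.Str.lower s)
def pvFlagLim (s : String) : Bool :=
  PySem.Str.isIn "limited engagement" (PySem.Str.lower s)
    || PySem.Str.isIn "low engagement" (PySem.Str.lower s)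
def pvFlagNeg (p : String) : Bool :=
  PySem.Str.isIn "negative sentiment" (PySem.Str.lower p)
    || PySem.Str.isIn "weak sentiment" (PySem.Str.lower p)
def pvFlagStrong (s : String) : Bool :=
  PySem.Str.isIn "community" (PySem.Str.lower s) && PySem.Str.isIn "strong" (PySem.Str.lower s)

-- p.split('(e.g. ')[1].split(')')[0] if '(e.g. ' in p else dflt
def pvTag (p dflt : String) : String :=
  if PySem.Str.isIn "(e.g. " p then
    (((PySem.Str.split? (((PySem.Str.split? p "(e.g. ").getD []).getD 1 "") ")").getD []).headD "")
  else dflt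
-- wt.split('WARNING: ')[1] if 'WARNING: ' in wt else wt
def pvWarnDetail (wt : String) : String :=
  if PySem.Str.isIn "WARNING: " wt then ((PySem.Str.split? wt "WARNING: ").getD []).getD 1 "" else wt

def pvWarnFlagMsg : String :=
  "Warning signals detected in social channels suggest potential for manipulation or misleading information."
def pvLimMsg : String :=
  "Limited social engagement indicates either low market awareness or cooling interest, presenting both risk and potential opportunity if traction increases."
def pvNegMsg : String :=
  "Negative sentiment trends could suppress price appreciation in the near term."
def pvStrongMsg : String :=
  "Strong community foundation provides potential for sustained interest and organic growth."
def pvNeutralMsg : String :=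
  "Social metrics show neutral sentiment with no significant positive or negative signals detected."

-- sentences from the 'community engagement' point (identical branch logic in A and B)
def pvCommSent (cp : String) : List String :=
  if PySem.Str.isIn "strong" (PySem.Str.lower cp) then ["Community engagement is strong."]
  else if PySem.Str.isIn "moderate" (PySem.Str.lower cp) then ["Community engagement is moderate."]
  else if PySem.Str.isIn "limited" (PySem.Str.lower cp) || PySem.Str.isIn "weak" (PySem.Str.lower cp)
      || PySem.Str.isIn "low" (PySem.Str.lower cp) then ["Community engagement is limited."]
  else
    let parts := (PySem.Str.splitMax? cp "community" 1).getD []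
    if 1 < parts.length then
      let r := PySem.Str.strip (parts.getD 1 "")
      if r ≠ "" then ["Community " ++ r ++ "."] else []
    else []

-- sentences from the 'overall social presence' point
def pvPresSent (pp : String) : List String :=
  let parts := (PySem.Str.splitMax? pp "overall" 1).getD []
  if 1 < parts.length then
    let r := PySem.Str.strip (parts.getD 1 "")
    if r ≠ "" then ["Overall " ++ r ++ "."] else []
  else []

-- ===== PORT A =====
-- literal transliteration of A: nine separate scans (next(...) = List.find?,
-- any(...) = List.any), appends in Python order.
def generate_social_paragraph_py (strengths : List String) (concerns : List String) (sentiment_points : List String) : String :=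
  let _ := concerns
  let i1 : List String :=
    match sentiment_points.find? pvIsHiAt with
    | some hf => ["Notable recent high-follower posts detected from " ++ pvTag hf "significant engagement" ++ "."]
    | none =>
      match sentiment_points.find? pvIsHi with
      | some _ => []
      | none =>
        match sentiment_points.find? pvIsMidAt with
        | some mf => ["Recent active engagement through mid-follower posts with " ++ pvTag mf "moderate engagement" ++ "."]
        | none => []
  let warning_tweet := sentiment_points.find? pvIsWarn
  let i2 := i1 ++ (match warning_tweet with
    | some wt => ["Warning signals detected including " ++ pvWarnDetail wt ++ "."]
    | none => [])
  let warning_flags := sentiment_points.any pvFlagWarn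
  let i3 := i2 ++ (if warning_flags && warning_tweet.isNone then [pvWarnFlagMsg] else [])
  let i4 := i3 ++ (match sentiment_points.find? pvIsComm with
    | some cp => pvCommSent cp
    | none => [])
  let i5 := i4 ++ (match sentiment_points.find? pvIsPres with
    | some pp => pvPresSent pp
    | none => [])
  let i6 := i5 ++ (if sentiment_points.any pvFlagLim then [pvLimMsg] else [])
  let i7 := i6 ++ (if sentiment_points.any pvFlagNeg then [pvNegMsg] else [])
  let i8 := i7 ++ (if strengths.any pvFlagStrong then [pvStrongMsg] else [])
  if i8.isEmpty then pvNeutralMsg else PySem.Str.join " " i8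

-- ===== PORT B =====
-- one fold over sentiment_points maintaining the scan state of Source B
structure PVScan where
  hiAt : Option String
  hiAny : Option String
  midAt : Option String
  warn : Option String
  comm : Option String
  pres : Option String
  warnFlag : Bool
  limited : Bool
  negative : Bool
deriving Repr, DecidableEq

def pvScanInit : PVScan :=
  ⟨none, none, none, none, none, none, false, false, false⟩

def pvStep (st : PVScan) (p : String) : PVScan :=
  { hiAt := if st.hiAt.isNone && pvIsHiAt p then some p else st.hiAt
    hiAny := if st.hiAny.isNone && pvIsHi p then some p else st.hiAny
    midAt := if st.midAt.isNone && pvIsMidAt p then some p else st.midAt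
    warn := if st.warn.isNone && pvIsWarn p then some p else st.warn
    comm := if st.comm.isNone && pvIsComm p then some p else st.comm
    pres := if st.pres.isNone && pvIsPres p then some p else st.pres
    warnFlag := st.warnFlag || pvFlagWarn p
    limited := st.limited || pvFlagLim p
    negative := st.negative || pvFlagNeg p }

def pvFollowPart (hiAt hiAny midAt : Option String) : List String :=
  match hiAt with
  | some hf => ["Notable recent high-follower posts detected from " ++ pvTag hf "significant engagement" ++ "."]
  | none =>
    if hiAny.isNone then
      match midAt with
      | some mf => ["Recent active engagement through mid-follower posts with " ++ pvTag mf "moderate engagement" ++ "."]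
      | none => []
    else []

def pvWarningPart (warn : Option String) (warnFlag : Bool) : List String :=
  match warn with
  | some wt => ["Warning signals detected including " ++ pvWarnDetail wt ++ "."]
  | none => if warnFlag then [pvWarnFlagMsg] else []

def pvCommunityPart : Option String → List String
  | some cp => pvCommSent cp
  | none => []

def pvPresencePart : Option String → List String
  | some pp => pvPresSent pp
  | none => []

def generate_social_paragraph_py_alt (strengths : List String) (concerns : List String) (sentiment_points : List String) : String :=
  let _ := concerns
  let st := sentiment_points.foldl pvStep pvScanInit
  let strongComm := strengths.foldl (fun b s => b || pvFlagStrong s) false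
  let out :=
    pvFollowPart st.hiAt st.hiAny st.midAt
      ++ pvWarningPart st.warn st.warnFlag
      ++ pvCommunityPart st.comm
      ++ pvPresencePart st.pres
      ++ (if st.limited then [pvLimMsg] else [])
      ++ (if st.negative then [pvNegMsg] else [])
      ++ (if strongComm then [pvStrongMsg] else [])
  if out.isEmpty then pvNeutralMsg else PySem.Str.join " " out

-- ===== PRECONDITION & SPEC =====
def Spec_generate_social_paragraph_py (strengths : List String) (concerns : List String) (sentiment_points : List String) (out : String) : Prop := out = generate_social_paragraph_py_alt strengths concerns sentiment_points
instance (strengths : List String) (concerns : List String) (sentiment_points : List String) (out : String) : Decidable (Spec_generate_social_paragraph_py strengths concerns sentiment_points out) := by unfold Spec_generate_social_paragraph_py; infer_instance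

-- ===== CLAIM (what is proved, stated in full; the proofs are below) =====
def Claim_equal_generate_social_paragraph_py : Prop := ∀ (strengths : List String) (concerns : List String) (sentiment_points : List String), Dom_generate_social_paragraph_py strengths concerns sentiment_points → Spec_generate_social_paragraph_py strengths concerns sentiment_points (generate_social_paragraph_py strengths concerns sentiment_points)

-- ===== LEMMAS AND PROOFS =====

-- the fold captures, in each Option field, the FIRST point satisfying its predicate
lemma pvScan_hiAt (l : List String) (st : PVScan) :
    (l.foldl pvStep st).hiAt = st.hiAt.or (l.find? pvIsHiAt) := by
  induction l generalizing st with
  | nil => simp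
  | cons x xs ih =>
    simp only [List.foldl_cons, ih, List.find?_cons]
    cases h : st.hiAt <;> cases hx : pvIsHiAt x <;> simp [pvStep, h, hx]

lemma pvScan_hiAny (l : List String) (st : PVScan) :
    (l.foldl pvStep st).hiAny = st.hiAny.or (l.find? pvIsHi) := by
  induction l generalizing st with
  | nil => simp
  | cons x xs ih =>
    simp only [List.foldl_cons, ih, List.find?_cons]
    cases h : st.hiAny <;> cases hx : pvIsHi x <;> simp [pvStep, h, hx]

lemma pvScan_midAt (l : List String) (st : PVScan) :
    (l.foldl pvStep st).midAt = st.midAt.or (l.find? pvIsMidAt) := by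
  induction l generalizing st with
  | nil => simp
  | cons x xs ih =>
    simp only [List.foldl_cons, ih, List.find?_cons]
    cases h : st.midAt <;> cases hx : pvIsMidAt x <;> simp [pvStep, h, hx]

lemma pvScan_warn (l : List String) (st : PVScan) :
    (l.foldl pvStep st).warn = st.warn.or (l.find? pvIsWarn) := by
  induction l generalizing st with
  | nil => simp
  | cons x xs ih =>
    simp only [List.foldl_cons, ih, List.find?_cons]
    cases h : st.warn <;> cases hx : pvIsWarn x <;> simp [pvStep, h, hx]

lemma pvScan_comm (l : List String) (st : PVScan) :
    (l.foldl pvStep st).comm = st.comm.or (l.find? pvIsComm) := by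
  induction l generalizing st with
  | nil => simp
  | cons x xs ih =>
    simp only [List.foldl_cons, ih, List.find?_cons]
    cases h : st.comm <;> cases hx : pvIsComm x <;> simp [pvStep, h, hx]

lemma pvScan_pres (l : List String) (st : PVScan) :
    (l.foldl pvStep st).pres = st.pres.or (l.find? pvIsPres) := by
  induction l generalizing st with
  | nil => simp
  | cons x xs ih =>
    simp only [List.foldl_cons, ih, List.find?_cons]
    cases h : st.pres <;> cases hx : pvIsPres x <;> simp [pvStep, h, hx]

lemma pvScan_warnFlag (l : List String) (st : PVScan) :
    (l.foldl pvStep st).warnFlag = (st.warnFlag || l.any pvFlagWarn) := by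
  induction l generalizing st with
  | nil => simp
  | cons x xs ih =>
    simp only [List.foldl_cons, ih, List.any_cons]
    simp [pvStep, Bool.or_assoc]

lemma pvScan_limited (l : List String) (st : PVScan) :
    (l.foldl pvStep st).limited = (st.limited || l.any pvFlagLim) := by
  induction l generalizing st with
  | nil => simp
  | cons x xs ih =>
    simp only [List.foldl_cons, ih, List.any_cons]
    simp [pvStep, Bool.or_assoc]

lemma pvScan_negative (l : List String) (st : PVScan) :
    (l.foldl pvStep st).negative = (st.negative || l.any pvFlagNeg) := by
  induction l generalizing st with
  | nil => simp
  | cons x xs ih =>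
    simp only [List.foldl_cons, ih, List.any_cons]
    simp [pvStep, Bool.or_assoc]

lemma pvFold_or (l : List String) (b : Bool) :
    l.foldl (fun b s => b || pvFlagStrong s) b = (b || l.any pvFlagStrong) := by
  induction l generalizing b with
  | nil => simp
  | cons x xs ih => simp [ih, Bool.or_assoc]

-- ===== VERDICT (by name: the statement is the Claim_ definition above) =====
theorem generate_social_paragraph_py_spec : Claim_equal_generate_social_paragraph_py := by
  intro strengths concerns sentiment_points _
  show _ = _
  unfold generate_social_paragraph_py generate_social_paragraph_py_alt
  simp only [pvScan_hiAt, pvScan_hiAny, pvScan_midAt, pvScan_warn, pvScan_comm, pvScan_pres,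
    pvScan_warnFlag, pvScan_limited, pvScan_negative, pvFold_or, pvScanInit,
    Option.or, Bool.false_or]
  cases hA : sentiment_points.find? pvIsHiAt <;>
    cases hB : sentiment_points.find? pvIsHi <;>
      cases hW : sentiment_points.find? pvIsWarn <;>
        cases hwf : sentiment_points.any pvFlagWarn <;>
          simp [pvFollowPart, pvWarningPart, pvCommunityPart, pvPresencePart,
            List.append_assoc]
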